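-- pv_equiv track=rewrite | github.com/psatyadileep/satya-grokking-patterns | Formation/AlgoOlympics/Graphs/12_FriendOFAFrined.py | isFOF
-- ===== SOURCE A (Python) =====
-- import collections
--
-- def isFOF(vertex_list: list[str], edge_list: list, user1: str, user2: str):
--
--     graph = collections.defaultdict(list)
--     q = collections.deque()
--
--     visited = set()
--
--     graph = {friend:[] for friend in vertex_list}
--     for source , neighbor in edge_list:
--         graph[source].append(neighbor)
--
--     q.append(user1)
--     visited.add(user1)
--
--     level = 0
--     while q and level<=2:
--         level+=1
--         for _ in range(len(q)):
--
--             friend = q.popleft()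
--
--             fof = graph.get(friend)
--             if not fof or len(fof)==0:
--                 continue
--
--             for friend in fof:
--                 if friend in visited:
--                     continue
--
--                 if level ==2 and friend==user2:
--                     return  True
--
--                 else:
--                     q.append(friend)
--                     visited.add(friend)
--
--     return False
-- ===== SOURCE B (Python) =====
-- def isFOF(vertex_list: list[str], edge_list: list, user1: str, user2: str):
--     graph = {friend: [] for friend in vertex_list}
--     for source, neighbor in edge_list:
--         graph[source].append(neighbor)
--
--     level1 = {n for n in graph.get(user1, []) if n != user1}
--     if user2 == user1 or user2 in level1:
--         return False
--     return any(user2 in graph.get(a, []) for a in level1)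
-- ===== Notes on version B (the rewrite author's own statement) =====
-- stated objective: simpler
-- what changed: Replaces the deque/level-counter BFS (which even expands a useless third level) with a direct two-level computation: build the direct-friend set, return False if user2 is user1 or a direct friend, else test membership of user2 in each direct friend's adjacency list.
import Mathlib
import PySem

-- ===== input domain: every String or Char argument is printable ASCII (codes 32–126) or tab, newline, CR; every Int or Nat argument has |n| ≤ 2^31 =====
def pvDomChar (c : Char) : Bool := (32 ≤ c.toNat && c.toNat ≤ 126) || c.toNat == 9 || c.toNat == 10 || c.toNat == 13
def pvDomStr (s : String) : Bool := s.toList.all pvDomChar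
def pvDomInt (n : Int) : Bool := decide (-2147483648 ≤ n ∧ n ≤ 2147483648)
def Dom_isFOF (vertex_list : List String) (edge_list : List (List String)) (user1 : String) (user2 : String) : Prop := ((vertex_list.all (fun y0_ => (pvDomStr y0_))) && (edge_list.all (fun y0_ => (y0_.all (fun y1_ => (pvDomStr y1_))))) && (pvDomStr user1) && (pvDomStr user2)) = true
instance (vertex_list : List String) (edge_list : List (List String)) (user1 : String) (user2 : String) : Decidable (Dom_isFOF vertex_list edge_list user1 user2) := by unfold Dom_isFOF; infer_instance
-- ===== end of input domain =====

-- B replaces A's deque/level-counter BFS (which also expands a useless third level) by a direct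
-- two-level check on the same adjacency dict; objective: simpler. Both build the dict identically
-- (pvGraph), so both raise identically on malformed edges (excluded by Pre_).

-- ===== PORT A =====
-- shared graph construction: `graph = {friend: [] for friend in vertex_list}` then
-- `for source, neighbor in edge_list: graph[source].append(neighbor)`; the KeyError /
-- unpacking-ValueError cases (source not a key, edge not a pair) are excluded by Pre_isFOF,
-- on those edges this port's behaviour is irrelevant (it skips / inserts).
def pvGraph (vertex_list : List String) (edge_list : List (List String)) :
    PySem.Dict String (List String) :=
  edge_list.foldl
    (fun g e =>
      match e with
      | [s, n] => g.modify s [] (fun l => l ++ [n])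
      | _ => g)
    (vertex_list.foldl (fun g v => g.insert v []) PySem.Dict.empty)

-- the inner `for friend in fof:` loop (early `return True` modelled by `.inl true`)
def pvScan (g : PySem.Dict String (List String)) (u2 : String) (level : Nat) :
    List String → List String → PySem.Set String → (Bool ⊕ (List String × PySem.Set String))
  | [], q, v => .inr (q, v)
  | f :: rest, q, v =>
    if f ∈ v then pvScan g u2 level rest q v
    else if level = 2 ∧ f = u2 then .inl true
    else pvScan g u2 level rest (q ++ [f]) (PySem.Set.add v f)

-- the `for _ in range(len(q))` loop: pop k items from the queue front
def pvRound (g : PySem.Dict String (List String)) (u2 : String) (level : Nat) :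
    Nat → List String → PySem.Set String → (Bool ⊕ (List String × PySem.Set String))
  | 0, q, v => .inr (q, v)
  | _ + 1, [], v => .inr ([], v)   -- unreachable: A pops exactly len(q) items and only appends
  | k + 1, f :: q, v =>
    match g.get? f with
    | none => pvRound g u2 level k q v
    | some fof =>
      if fof.isEmpty then pvRound g u2 level k q v
      else
        match pvScan g u2 level fof q v with
        | .inl b => .inl b
        | .inr (q', v') => pvRound g u2 level k q' v'

-- the `while q and level <= 2` loop; it runs at most 3 times (level values 1, 2, 3)
def pvWhile (g : PySem.Dict String (List String)) (u2 : String) :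
    Nat → List String → PySem.Set String → Bool
  | 0, _, _ => false
  | fuel + 1, q, v =>
    if q.isEmpty then false
    else
      match pvRound g u2 (3 - fuel) q.length q v with
      | .inl b => b
      | .inr (q', v') => pvWhile g u2 fuel q' v'

def isFOF (vertex_list : List String) (edge_list : List (List String)) (user1 : String) (user2 : String) : Bool :=
  pvWhile (pvGraph vertex_list edge_list) user2 3 [user1]
    (PySem.Set.add PySem.Set.empty user1)

-- ===== PORT B =====
def isFOF_alt (vertex_list : List String) (edge_list : List (List String)) (user1 : String) (user2 : String) : Bool :=
  let graph := pvGraph vertex_list edge_list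
  let level1 : PySem.Set String :=
    PySem.Set.ofList ((graph.getD user1 []).filter (fun n => n ≠ user1))
  if user2 == user1 || PySem.Set.contains level1 user2 then false
  else level1.any (fun a => (graph.getD a []).contains user2)

-- ===== PRECONDITION & SPEC =====
-- Pre_ excludes exactly the inputs on which the Python raises: an edge that is not a pair
-- (ValueError on unpacking) or whose source is not in vertex_list (KeyError).
def Pre_isFOF (vertex_list : List String) (edge_list : List (List String)) (user1 : String) (user2 : String) : Prop :=
  ∀ e ∈ edge_list, e.length = 2 ∧ e.headD "" ∈ vertex_list
instance (vertex_list : List String) (edge_list : List (List String)) (user1 : String) (user2 : String) : Decidable (Pre_isFOF vertex_list edge_list user1 user2) := by unfold Pre_isFOF; infer_instance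

def pvWitness_isFOF : List String × List (List String) × String × String :=
  (["a", "b", "c"], [["a", "b"], ["b", "c"]], "a", "c")

def Spec_isFOF (vertex_list : List String) (edge_list : List (List String)) (user1 : String) (user2 : String) (out : Bool) : Prop := out = isFOF_alt vertex_list edge_list user1 user2
instance (vertex_list : List String) (edge_list : List (List String)) (user1 : String) (user2 : String) (out : Bool) : Decidable (Spec_isFOF vertex_list edge_list user1 user2 out) := by unfold Spec_isFOF; infer_instance

-- ===== CLAIM (what is proved, stated in full; the proofs are below) =====
def Claim_equal_isFOF : Prop := ∀ (vertex_list : List String) (edge_list : List (List String)) (user1 : String) (user2 : String), Dom_isFOF vertex_list edge_list user1 user2 → Pre_isFOF vertex_list edge_list user1 user2 → Spec_isFOF vertex_list edge_list user1 user2 (isFOF vertex_list edge_list user1 user2)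

-- ===== LEMMAS AND PROOFS =====

lemma pvScan_ne2 (g : PySem.Dict String (List String)) (u2 : String) (level : Nat)
    (hl : level ≠ 2) :
    ∀ (fof q : List String) (v : PySem.Set String),
      ∃ q' v', pvScan g u2 level fof q v = .inr (q', v') ∧
        (∀ x, x ∈ q' ↔ x ∈ q ∨ (x ∈ fof ∧ x ∉ v)) ∧
        (∀ x, x ∈ v' ↔ x ∈ v ∨ x ∈ fof) := by
  intro fof
  induction fof with
  | nil => intro q v; exact ⟨q, v, rfl, by simp, by simp⟩
  | cons f rest ih =>
    intro q v
    by_cases hf : f ∈ v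
    · obtain ⟨q', v', heq, hq, hv⟩ := ih q v
      refine ⟨q', v', by simp [pvScan, hf, heq], ?_, ?_⟩
      · intro x; rw [hq]; constructor
        · rintro (h | ⟨h1, h2⟩); · exact .inl h
          exact .inr ⟨.tail _ h1, h2⟩
        · rintro (h | ⟨h1, h2⟩); · exact .inl h
          rcases List.mem_cons.mp h1 with rfl | h1
          · exact absurd hf h2
          · exact .inr ⟨h1, h2⟩
      · intro x; rw [hv]; simp only [List.mem_cons]; constructor
        · rintro (h | h); · exact .inl h
          · exact .inr (.inr h)
        · rintro (h | rfl | h)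
          · exact .inl h
          · exact .inl hf
          · exact .inr h
    · have hcond : ¬ (level = 2 ∧ f = u2) := fun h => hl h.1
      obtain ⟨q', v', heq, hq, hv⟩ := ih (q ++ [f]) (PySem.Set.add v f)
      refine ⟨q', v', ?_, ?_, ?_⟩
      · simp only [pvScan, if_neg hf, if_neg hcond]; exact heq
      · intro x
        have h := hq x
        simp only [List.mem_append, PySem.Set.mem_add, List.mem_cons] at h ⊢
        by_cases hxf : x = f
        · subst hxf; tauto
        · tauto
      · intro x
        have h := hv x
        simp only [PySem.Set.mem_add, List.mem_cons] at h ⊢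
        tauto

lemma pvRound_ne2 (g : PySem.Dict String (List String)) (u2 : String) (level : Nat)
    (hl : level ≠ 2) :
    ∀ (k : Nat) (q : List String) (v : PySem.Set String),
      ∃ q' v', pvRound g u2 level k q v = .inr (q', v') := by
  intro k
  induction k with
  | zero => intro q v; exact ⟨q, v, rfl⟩
  | succ k ih =>
    intro q v
    cases q with
    | nil => exact ⟨[], v, rfl⟩
    | cons f q =>
      cases hget : g.get? f with
      | none => obtain ⟨q', v', h⟩ := ih q v; exact ⟨q', v', by simp [pvRound, hget, h]⟩
      | some fof =>
        by_cases he : fof.isEmpty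
        · obtain ⟨q', v', h⟩ := ih q v
          exact ⟨q', v', by simp [pvRound, hget, he, h]⟩
        · obtain ⟨q1, v1, hscan, _, _⟩ := pvScan_ne2 g u2 level hl fof q v
          obtain ⟨q', v', h⟩ := ih q1 v1
          exact ⟨q', v', by simp [pvRound, hget, he, hscan, h]⟩

lemma pvScan_cons_vis (g : PySem.Dict String (List String)) (u2 : String) (level : Nat)
    (f : String) (rest q : List String) (v : PySem.Set String) (hf : f ∈ v) :
    pvScan g u2 level (f :: rest) q v = pvScan g u2 level rest q v := by
  simp [pvScan, hf]

lemma pvScan_cons_hit (g : PySem.Dict String (List String)) (u2 : String)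
    (rest q : List String) (v : PySem.Set String) (hf : u2 ∉ v) :
    pvScan g u2 2 (u2 :: rest) q v = .inl true := by
  simp [pvScan, hf]

lemma pvScan_cons_step (g : PySem.Dict String (List String)) (u2 : String)
    (f : String) (rest q : List String) (v : PySem.Set String) (hf : f ∉ v) (hfu : f ≠ u2) :
    pvScan g u2 2 (f :: rest) q v = pvScan g u2 2 rest (q ++ [f]) (PySem.Set.add v f) := by
  simp [pvScan, hf, hfu]

lemma pvScan_two (g : PySem.Dict String (List String)) (u2 : String) :
    ∀ (fof q : List String) (v : PySem.Set String), u2 ∉ v →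
      (u2 ∈ fof ∧ pvScan g u2 2 fof q v = .inl true) ∨
      (u2 ∉ fof ∧ ∃ news v', pvScan g u2 2 fof q v = .inr (q ++ news, v') ∧ u2 ∉ v') := by
  intro fof
  induction fof with
  | nil => intro q v hu; exact .inr ⟨by simp, [], v, by simp [pvScan], hu⟩
  | cons f rest ih =>
    intro q v hu
    by_cases hf : f ∈ v
    · have hne : u2 ≠ f := fun h => hu (h ▸ hf)
      rcases ih q v hu with ⟨h1, h2⟩ | ⟨h1, news, v', h2, h3⟩
      · exact .inl ⟨.tail _ h1, by rw [pvScan_cons_vis _ _ _ _ _ _ _ hf]; exact h2⟩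
      · refine .inr ⟨?_, news, v', by rw [pvScan_cons_vis _ _ _ _ _ _ _ hf]; exact h2, h3⟩
        simp only [List.mem_cons]; rintro (h | h); exact hne h; exact h1 h
    · by_cases hfu : f = u2
      · refine .inl ⟨by rw [hfu]; exact .head _, ?_⟩
        rw [hfu] at hf ⊢
        exact pvScan_cons_hit g u2 rest q v hf
      · have hu' : u2 ∉ PySem.Set.add v f := by
          simp only [PySem.Set.mem_add]; rintro (h | h); exact hu h; exact hfu h.symm
        rcases ih (q ++ [f]) (PySem.Set.add v f) hu' with ⟨h1, h2⟩ | ⟨h1, news, v', h2, h3⟩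
        · refine .inl ⟨.tail _ h1, ?_⟩
          rw [pvScan_cons_step g u2 f rest q v hf hfu]; exact h2
        · refine .inr ⟨?_, f :: news, v', ?_, h3⟩
          · simp only [List.mem_cons]; rintro (h | h); exact hfu h.symm; exact h1 h
          · rw [pvScan_cons_step g u2 f rest q v hf hfu, h2]; simp

lemma pvScan_two_vis (g : PySem.Dict String (List String)) (u2 : String) :
    ∀ (fof q : List String) (v : PySem.Set String), u2 ∈ v →
      ∃ q' v', pvScan g u2 2 fof q v = .inr (q', v') ∧ u2 ∈ v' := by
  intro fof
  induction fof with
  | nil => intro q v hu; exact ⟨q, v, rfl, hu⟩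
  | cons f rest ih =>
    intro q v hu
    by_cases hf : f ∈ v
    · obtain ⟨q', v', h1, h2⟩ := ih q v hu
      exact ⟨q', v', by simp [pvScan, hf, h1], h2⟩
    · have hfu : f ≠ u2 := fun h => hf (h ▸ hu)
      obtain ⟨q', v', h1, h2⟩ := ih (q ++ [f]) (PySem.Set.add v f)
        (by simp only [PySem.Set.mem_add]; exact .inl hu)
      refine ⟨q', v', ?_, h2⟩
      rw [pvScan_cons_step g u2 f rest q v hf (fun h => hfu h)]; exact h1

lemma pvRound_two_vis (g : PySem.Dict String (List String)) (u2 : String) :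
    ∀ (k : Nat) (q : List String) (v : PySem.Set String), u2 ∈ v →
      ∃ q' v', pvRound g u2 2 k q v = .inr (q', v') := by
  intro k
  induction k with
  | zero => intro q v _; exact ⟨q, v, rfl⟩
  | succ k ih =>
    intro q v hu
    cases q with
    | nil => exact ⟨[], v, rfl⟩
    | cons f q =>
      cases hget : g.get? f with
      | none => obtain ⟨q', v', h⟩ := ih q v hu; exact ⟨q', v', by simp [pvRound, hget, h]⟩
      | some fof =>
        by_cases he : fof.isEmpty
        · obtain ⟨q', v', h⟩ := ih q v hu
          exact ⟨q', v', by simp [pvRound, hget, he, h]⟩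
        · obtain ⟨q1, v1, hscan, hv1⟩ := pvScan_two_vis g u2 fof q v hu
          obtain ⟨q', v', h⟩ := ih q1 v1 hv1
          exact ⟨q', v', by simp [pvRound, hget, he, hscan, h]⟩

lemma pvRound_two (g : PySem.Dict String (List String)) (u2 : String) :
    ∀ (k : Nat) (q : List String) (v : PySem.Set String), u2 ∉ v → k ≤ q.length →
      ((∃ a ∈ q.take k, u2 ∈ g.getD a []) ∧ pvRound g u2 2 k q v = .inl true) ∨
      ((¬ ∃ a ∈ q.take k, u2 ∈ g.getD a []) ∧
        ∃ q' v', pvRound g u2 2 k q v = .inr (q', v')) := by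
  intro k
  induction k with
  | zero => intro q v _ _; exact .inr ⟨by simp, q, v, rfl⟩
  | succ k ih =>
    intro q v hu hk
    cases q with
    | nil => simp at hk
    | cons f q =>
      have hk' : k ≤ q.length := by simpa using hk
      cases hget : g.get? f with
      | none =>
        have hgd : g.getD f [] = [] := by
          rw [PySem.Dict.getD_eq_get?_getD, hget]; rfl
        rcases ih q v hu hk' with ⟨⟨a, ha, hm⟩, h2⟩ | ⟨h1, q', v', h2⟩
        · exact .inl ⟨⟨a, List.mem_cons_of_mem _ ha, hm⟩, by simp [pvRound, hget, h2]⟩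
        · refine .inr ⟨?_, q', v', by simp [pvRound, hget, h2]⟩
          rintro ⟨a, ha, hm⟩
          rcases List.mem_cons.mp (by simpa using ha) with rfl | ha'
          · rw [hgd] at hm; simp at hm
          · exact h1 ⟨a, by simpa using ha', hm⟩
      | some fof =>
        have hgd : g.getD f [] = fof := by
          rw [PySem.Dict.getD_eq_get?_getD, hget]; rfl
        by_cases he : fof.isEmpty
        · have hfe : fof = [] := List.isEmpty_iff.mp he
          rcases ih q v hu hk' with ⟨⟨a, ha, hm⟩, h2⟩ | ⟨h1, q', v', h2⟩
          · exact .inl ⟨⟨a, List.mem_cons_of_mem _ ha, hm⟩, by simp [pvRound, hget, he, h2]⟩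
          · refine .inr ⟨?_, q', v', by simp [pvRound, hget, he, h2]⟩
            rintro ⟨a, ha, hm⟩
            rcases List.mem_cons.mp (by simpa using ha) with rfl | ha'
            · rw [hgd, hfe] at hm; simp at hm
            · exact h1 ⟨a, by simpa using ha', hm⟩
        · rcases pvScan_two g u2 fof q v hu with ⟨h1, h2⟩ | ⟨h1, news, v', h2, h3⟩
          · exact .inl ⟨⟨f, by simp, hgd ▸ h1⟩, by simp [pvRound, hget, he, h2]⟩
          · have hlen : k ≤ (q ++ news).length := by simp; omega
            have htake : (q ++ news).take k = q.take k :=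
              List.take_append_of_le_length hk'
            rcases ih (q ++ news) v' h3 hlen with ⟨⟨a, ha, hm⟩, h4⟩ | ⟨h4, q', v'', h5⟩
            · rw [htake] at ha
              exact .inl ⟨⟨a, List.mem_cons_of_mem _ ha, hm⟩,
                by simp [pvRound, hget, he, h2, h4]⟩
            · refine .inr ⟨?_, q', v'', by simp [pvRound, hget, he, h2, h5]⟩
              rintro ⟨a, ha, hm⟩
              rcases List.mem_cons.mp (by simpa using ha) with rfl | ha'
              · exact h1 (hgd ▸ hm)
              · exact h4 ⟨a, by rw [htake]; simpa using ha', hm⟩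

lemma pvKey (g : PySem.Dict String (List String)) (u1 u2 : String) :
    pvWhile g u2 3 [u1] (PySem.Set.add PySem.Set.empty u1) =
      (if u2 == u1 || PySem.Set.contains
            (PySem.Set.ofList ((g.getD u1 []).filter (fun n => n ≠ u1))) u2 then false
       else (PySem.Set.ofList ((g.getD u1 []).filter (fun n => n ≠ u1))).any
              (fun a => (g.getD a []).contains u2)) := by
  set v0 : PySem.Set String := PySem.Set.add PySem.Set.empty u1 with hv0def
  have hv0 : ∀ x, x ∈ v0 ↔ x = u1 := by
    intro x; simp [hv0def, PySem.Set.empty]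
  cases hget : g.get? u1 with
  | none =>
    have hgd : g.getD u1 [] = [] := by rw [PySem.Dict.getD_eq_get?_getD, hget]; rfl
    have hA : pvWhile g u2 3 [u1] v0 = false := by
      simp [pvWhile, pvRound, hget]
    rw [hA, hgd]
    cases h : (u2 == u1) <;> simp
  | some fof =>
    have hgd : g.getD u1 [] = fof := by rw [PySem.Dict.getD_eq_get?_getD, hget]; rfl
    by_cases he : fof.isEmpty
    · have hfe : fof = [] := List.isEmpty_iff.mp he
      have hA : pvWhile g u2 3 [u1] v0 = false := by
        simp [pvWhile, pvRound, hget, hfe]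
      rw [hA, hgd, hfe]
      cases h : (u2 == u1) <;> simp
    · obtain ⟨q1, v1, hscan, hq1, hv1⟩ := pvScan_ne2 g u2 1 (by omega) fof [] v0
      have hq1' : ∀ x, x ∈ q1 ↔ x ∈ fof ∧ x ≠ u1 := by
        intro x; rw [hq1 x]; simp [hv0 x]
      have hv1' : ∀ x, x ∈ v1 ↔ x = u1 ∨ x ∈ fof := by
        intro x; rw [hv1 x, hv0 x]
      have hmem : ∀ a, a ∈ PySem.Set.ofList ((g.getD u1 []).filter (fun n => n ≠ u1)) ↔
          a ∈ fof ∧ a ≠ u1 := by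
        intro a; rw [PySem.Set.mem_ofList]; simp [hgd]
      have hA : pvWhile g u2 3 [u1] v0 = pvWhile g u2 2 q1 v1 := by
        simp [pvWhile, pvRound, hget, he, hscan]
      rw [hA]
      cases hq1e : q1 with
      | nil =>
        have hlv : PySem.Set.ofList ((g.getD u1 []).filter (fun n => n ≠ u1)) = [] := by
          rw [List.eq_nil_iff_forall_not_mem]
          intro a ha
          have := (hq1' a).mpr ((hmem a).mp ha)
          simp [hq1e] at this
        rw [hlv]
        cases h : (u2 == u1) <;> simp [pvWhile]
      | cons f q1t =>
        rw [← hq1e]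
        by_cases hvis : u2 ∈ v1
        · obtain ⟨q2, v2, hr⟩ := pvRound_two_vis g u2 q1.length q1 v1 hvis
          have hA2 : pvWhile g u2 2 q1 v1 = false := by
            rw [hq1e] at hr ⊢
            simp only [List.length_cons] at hr
            obtain ⟨q3, v3, h3⟩ := pvRound_ne2 g u2 3 (by omega) q2.length q2 v2
            simp [pvWhile, hr, h3]
          rw [hA2]
          have hcond : (u2 == u1 || PySem.Set.contains
              (PySem.Set.ofList ((g.getD u1 []).filter (fun n => n ≠ u1))) u2) = true := by
            rcases (hv1' u2).mp hvis with h | h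
            · simp [h]
            · simp [hgd]; tauto
          rw [hcond]; rfl
        · have hnu : u2 ≠ u1 := fun h => hvis ((hv1' u2).mpr (.inl h))
          have hnf : u2 ∉ fof := fun h => hvis ((hv1' u2).mpr (.inr h))
          have hcond : (u2 == u1 || PySem.Set.contains
              (PySem.Set.ofList ((g.getD u1 []).filter (fun n => n ≠ u1))) u2) = false := by
            simp [hgd]; tauto
          rw [hcond]
          rcases pvRound_two g u2 q1.length q1 v1 hvis (le_refl _)
            with ⟨⟨a, ha, hm⟩, hr⟩ | ⟨hno, q2, v2, hr⟩
          · rw [List.take_length] at ha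
            have hA2 : pvWhile g u2 2 q1 v1 = true := by
              rw [hq1e] at hr ⊢
              simp only [List.length_cons] at hr
              simp [pvWhile, hr]
            rw [hA2]
            have : (PySem.Set.ofList ((g.getD u1 []).filter (fun n => n ≠ u1))).any
                (fun a => (g.getD a []).contains u2) = true := by
              rw [List.any_eq_true]
              exact ⟨a, (hmem a).mpr ((hq1' a).mp ha), by simpa using hm⟩
            rw [this]; rfl
          · have hA2 : pvWhile g u2 2 q1 v1 = false := by
              rw [hq1e] at hr ⊢
              simp only [List.length_cons] at hr
              obtain ⟨q3, v3, h3⟩ := pvRound_ne2 g u2 3 (by omega) q2.length q2 v2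
              simp [pvWhile, hr, h3]
            rw [hA2]
            have : (PySem.Set.ofList ((g.getD u1 []).filter (fun n => n ≠ u1))).any
                (fun a => (g.getD a []).contains u2) = false := by
              rw [List.any_eq_false]
              intro a ha
              simp only [List.contains_iff_mem]
              intro hm
              exact hno ⟨a, by rw [List.take_length]; exact (hq1' a).mpr ((hmem a).mp ha),
                by simpa using hm⟩
            rw [this]; simp

-- ===== VERDICT (by name: the statement is the Claim_ definition above) =====
theorem isFOF_spec : Claim_equal_isFOF := by
  intro vertex_list edge_list user1 user2 _ _
  unfold Spec_isFOF isFOF isFOF_alt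
  exact pvKey (pvGraph vertex_list edge_list) user1 user2
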